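-- pv_equiv track=rewrite | github.com/ZAIDHAKIM07/DSA-456-ZAA- | lab 01.py | sum_to_goal
-- ===== SOURCE A (Python) =====
-- def sum_to_goal(numbers, goal):
--     seen = set()
--     for number in numbers:
--         complement = goal - number
--         if complement in seen:
--             return number * complement
--         seen.add(number)
--     return 0
-- ===== SOURCE B (Python) =====
-- def sum_to_goal(numbers, goal):
--     nums = list(numbers)
--     n = len(nums)
--     first = {}
--     for j, v in enumerate(nums):
--         if v not in first:
--             first[v] = j
--     for j, v in enumerate(nums):
--         c = goal - v
--         if first.get(c, n) < j:
--             return v * c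
--     return 0
-- ===== Notes on version B (the rewrite author's own statement) =====
-- stated objective: alternative
-- what changed: Two staged passes instead of A's single pass with a growing seen-set: pass 1 precomputes a first-occurrence-index dictionary of the whole list, pass 2 returns at the first position whose complement's first occurrence is strictly earlier.
import Mathlib
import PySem

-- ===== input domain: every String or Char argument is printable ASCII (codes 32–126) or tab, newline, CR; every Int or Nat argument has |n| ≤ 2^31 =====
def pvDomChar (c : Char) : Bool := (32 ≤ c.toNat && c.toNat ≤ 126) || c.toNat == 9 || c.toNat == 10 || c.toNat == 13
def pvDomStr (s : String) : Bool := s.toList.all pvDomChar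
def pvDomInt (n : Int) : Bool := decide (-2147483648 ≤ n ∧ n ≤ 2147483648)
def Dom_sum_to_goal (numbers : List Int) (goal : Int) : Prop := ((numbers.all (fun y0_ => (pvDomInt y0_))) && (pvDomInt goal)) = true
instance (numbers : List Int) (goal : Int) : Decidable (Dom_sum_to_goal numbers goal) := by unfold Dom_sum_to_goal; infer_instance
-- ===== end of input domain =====

-- B replaces A's single pass with a growing seen-set by two staged passes: first build a
-- first-occurrence-index dictionary, then scan for the first position whose complement
-- occurs strictly earlier (alternative algorithm, same return value).

-- ===== PORT A =====
-- A's loop: 'seen' is a Python set; the early return becomes the first branch.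
def sumToGoalLoopA (goal : Int) : List Int → PySem.Set Int → Int
  | [], _ => 0
  | number :: rest, seen =>
    let complement := goal - number
    if PySem.Set.contains seen complement then number * complement
    else sumToGoalLoopA goal rest (PySem.Set.add seen number)

def sum_to_goal (numbers : List Int) (goal : Int) : Int :=
  sumToGoalLoopA goal numbers PySem.Set.empty

-- ===== PORT B =====
-- B's pass 1: 'for j, v in enumerate(nums): if v not in first: first[v] = j'
-- (enumerate rendered as the explicit index counter j).
def buildFirst : Int → List Int → PySem.Dict Int Int → PySem.Dict Int Int
  | _, [], first => first
  | j, v :: rest, first =>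
    buildFirst (j + 1) rest
      (if PySem.Dict.contains first v then first else PySem.Dict.insert first v j)

-- B's pass 2: 'for j, v in enumerate(nums): c = goal - v; if first.get(c, n) < j: return v * c'.
def scanFirst (goal n : Int) (first : PySem.Dict Int Int) : Int → List Int → Int
  | _, [] => 0
  | j, v :: rest =>
    let c := goal - v
    if PySem.Dict.getD first c n < j then v * c else scanFirst goal n first (j + 1) rest

def sum_to_goal_alt (numbers : List Int) (goal : Int) : Int :=
  let nums := numbers
  let n : Int := nums.length
  let first := buildFirst 0 nums PySem.Dict.empty
  scanFirst goal n first 0 nums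

-- ===== PRECONDITION & SPEC =====
def Spec_sum_to_goal (numbers : List Int) (goal : Int) (out : Int) : Prop := out = sum_to_goal_alt numbers goal
instance (numbers : List Int) (goal : Int) (out : Int) : Decidable (Spec_sum_to_goal numbers goal out) := by unfold Spec_sum_to_goal; infer_instance

-- ===== CLAIM (what is proved, stated in full; the proofs are below) =====
def Claim_equal_sum_to_goal : Prop := ∀ (numbers : List Int) (goal : Int), Dom_sum_to_goal numbers goal → Spec_sum_to_goal numbers goal (sum_to_goal numbers goal)

-- ===== LEMMAS AND PROOFS =====

-- First-occurrence index of c in l, counting from k (reference function for buildFirst).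
def fidx (c : Int) : Int → List Int → Option Int
  | _, [] => none
  | k, v :: rest => if v = c then some k else fidx c (k + 1) rest

theorem buildFirst_get? (l : List Int) :
    ∀ (k : Int) (d : PySem.Dict Int Int) (c : Int),
      (buildFirst k l d).get? c = (d.get? c).orElse (fun _ => fidx c k l) := by
  induction l with
  | nil => intro k d c; cases h : d.get? c <;> simp [buildFirst, fidx, h, Option.orElse]
  | cons v rest ih =>
    intro k d c
    by_cases hv : d.contains v = true
    · rw [buildFirst, if_pos hv, ih]
      by_cases hc : c = v
      · subst hc
        rw [PySem.Dict.contains_eq_isSome_get?] at hv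
        cases h : d.get? c with
        | none => rw [h] at hv; simp at hv
        | some w => simp [Option.orElse]
      · have hne : ¬ v = c := fun h => hc h.symm
        simp only [fidx]
        rw [if_neg hne]
    · rw [buildFirst, if_neg hv, ih]
      by_cases hc : c = v
      · subst hc
        have hd : d.get? c = none := by
          rw [PySem.Dict.contains_eq_isSome_get?] at hv
          cases h : d.get? c with
          | none => rfl
          | some w => rw [h] at hv; simp at hv
        simp [PySem.Dict.get?_insert_self, hd, fidx, Option.orElse]
      · rw [PySem.Dict.get?_insert_of_ne d k hc]
        have hne : ¬ v = c := fun h => hc h.symm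
        simp only [fidx]
        rw [if_neg hne]

-- fidx returns an index ≥ its start counter.
theorem fidx_ge (c : Int) : ∀ (k : Int) (l : List Int) (i : Int), fidx c k l = some i → k ≤ i := by
  intro k l
  induction l generalizing k with
  | nil => intro i h; simp [fidx] at h
  | cons v rest ih =>
    intro i h
    by_cases hv : v = c
    · rw [fidx, if_pos hv] at h
      injection h with h
      omega
    · rw [fidx, if_neg hv] at h; have := ih (k + 1) i h; omega

-- Key characterisation: the first-occurrence index of c is < k + j iff c occurs in the first j elements.
theorem fidx_lt_iff (c : Int) :
    ∀ (l : List Int) (k N j : Int), 0 ≤ j → j ≤ l.length → (l.length : Int) ≤ N →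
      (((fidx c k l).getD (k + N) < k + j) ↔ c ∈ l.take j.toNat) := by
  intro l
  induction l with
  | nil =>
    intro k N j h0 hj hN
    simp only [List.length_nil, Int.natCast_zero] at hj hN
    have : j = 0 := by omega
    subst this
    simp [fidx, Option.getD]; omega
  | cons v rest ih =>
    intro k N j h0 hj hN
    by_cases hv : v = c
    · subst hv
      rw [fidx, if_pos rfl]
      simp only [Option.getD_some]
      constructor
      · intro h
        have hjpos : 0 < j := by omega
        have : j.toNat = (j.toNat - 1) + 1 := by omega
        rw [this, List.take_succ_cons]
        exact List.mem_cons_self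
      · intro hmem
        rcases Int.lt_or_le 0 j with hpos | hle
        · omega
        · have hz : j = 0 := by omega
          subst hz
          simp at hmem
    · rw [fidx, if_neg hv]
      by_cases hj0 : j = 0
      · subst hj0
        simp only [Int.toNat_zero, List.take_zero, List.not_mem_nil, iff_false, not_lt, Int.add_zero]
        cases h : fidx c (k + 1) rest with
        | none =>
          simp only [Option.getD_none]
          have : (0:Int) ≤ (rest.length : Int) := by positivity
          simp only [List.length_cons] at hN
          push_cast at hN
          omega
        | some i =>
          simp only [Option.getD_some]
          have := fidx_ge c (k + 1) rest i h
          omega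
      · have hstep : k + N = (k + 1) + (N - 1) := by ring
        rw [hstep]
        have hrec := ih (k + 1) (N - 1) (j - 1) (by omega)
          (by simp only [List.length_cons] at hj; push_cast at hj ⊢; omega)
          (by simp only [List.length_cons] at hN; push_cast at hN ⊢; omega)
        have hto : j.toNat = (j - 1).toNat + 1 := by omega
        rw [hto, List.take_succ_cons, List.mem_cons]
        rw [← hrec]
        constructor
        · intro h; right; omega
        · intro h
          rcases h with h | h
          · exact absurd h.symm hv
          · omega

-- A prefix 'pre' of nums satisfies: first.get(c, n) < pre.length ↔ c ∈ pre.
theorem first_lt_iff (nums : List Int) (c : Int) (pre suf : List Int) (h : nums = pre ++ suf) :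
    ((buildFirst 0 nums PySem.Dict.empty).getD c (nums.length : Int) < (pre.length : Int))
      ↔ c ∈ pre := by
  rw [PySem.Dict.getD_eq_get?_getD, buildFirst_get?]
  simp only [PySem.Dict.get?_empty, Option.orElse]
  have h1 : (0:Int) + (nums.length : Int) = (nums.length : Int) := by ring
  have h2 : (0:Int) + (pre.length : Int) = (pre.length : Int) := by ring
  have := fidx_lt_iff c nums 0 (nums.length : Int) (pre.length : Int)
    (by positivity) (by rw [h]; simp) (le_refl _)
  rw [h1, h2] at this
  rw [this]
  subst h
  rw [Int.toNat_natCast, List.take_left]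

-- Loop correspondence: A's loop on a suffix with seen = elements of the prefix equals B's scan
-- at counter pre.length with the precomputed first-occurrence dictionary.
theorem loop_eq (nums : List Int) (goal : Int) :
    ∀ (suf pre : List Int) (seen : PySem.Set Int),
      nums = pre ++ suf → (∀ x : Int, x ∈ seen ↔ x ∈ pre) →
      sumToGoalLoopA goal suf seen
        = scanFirst goal (nums.length : Int) (buildFirst 0 nums PySem.Dict.empty)
            (pre.length : Int) suf := by
  intro suf
  induction suf with
  | nil => intro pre seen _ _; rfl
  | cons y rest ih =>
    intro pre seen hsplit hmem
    have hc : (PySem.Set.contains seen (goal - y) = true) ↔ goal - y ∈ pre := by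
      rw [PySem.Set.contains_iff]; exact hmem _
    have hfi := first_lt_iff nums (goal - y) pre (y :: rest) hsplit
    simp only [sumToGoalLoopA, scanFirst]
    by_cases h : (goal - y) ∈ pre
    · rw [if_pos (hc.mpr h), if_pos (hfi.mpr h)]
    · rw [if_neg (fun hh => h (hc.mp hh)), if_neg (fun hh => h (hfi.mp hh))]
      have := ih (pre ++ [y]) (PySem.Set.add seen y)
        (by rw [hsplit, List.append_assoc]; rfl)
        (fun x => by rw [PySem.Set.mem_add, hmem x]; simp [List.mem_append, or_comm])
      simpa using this

-- ===== VERDICT (by name: the statement is the Claim_ definition above) =====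
theorem sum_to_goal_spec : Claim_equal_sum_to_goal := by
  intro numbers goal _
  show sum_to_goal numbers goal = sum_to_goal_alt numbers goal
  unfold sum_to_goal sum_to_goal_alt
  have := loop_eq numbers goal numbers [] PySem.Set.empty (by simp)
    (fun x => by simp [PySem.Set.empty])
  simpa using this
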